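-- pv_equiv track=rewrite | github.com/alqaisi-omar/8 | Вариант9-1.py | count_and_max_divisible
-- ===== SOURCE A (Python) =====
-- def count_and_max_divisible(matrix, k):
--     count = 0
--     max_divisible = None
--     for row in matrix:
--         for num in row:
--             if num % k == 0:
--                 count += 1
--                 if max_divisible is None or num > max_divisible:
--                     max_divisible = num
--     return count, max_divisible
-- ===== SOURCE B (Python) =====
-- def count_and_max_divisible(matrix, k):
--     flat = sorted((num for row in matrix for num in row), reverse=True)
--     count = sum(1 for num in flat if num % k == 0)
--     max_divisible = next((num for num in flat if num % k == 0), None)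
--     return count, max_divisible
-- ===== Notes on version B (the rewrite author's own statement) =====
-- stated objective: alternative
-- what changed: Replaces the fused single-pass counter+running-max loop by sorting the flattened matrix in descending order, then taking the count as a sum and the maximum as the FIRST divisible element of the sorted list (no running max at all).
import Mathlib
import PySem

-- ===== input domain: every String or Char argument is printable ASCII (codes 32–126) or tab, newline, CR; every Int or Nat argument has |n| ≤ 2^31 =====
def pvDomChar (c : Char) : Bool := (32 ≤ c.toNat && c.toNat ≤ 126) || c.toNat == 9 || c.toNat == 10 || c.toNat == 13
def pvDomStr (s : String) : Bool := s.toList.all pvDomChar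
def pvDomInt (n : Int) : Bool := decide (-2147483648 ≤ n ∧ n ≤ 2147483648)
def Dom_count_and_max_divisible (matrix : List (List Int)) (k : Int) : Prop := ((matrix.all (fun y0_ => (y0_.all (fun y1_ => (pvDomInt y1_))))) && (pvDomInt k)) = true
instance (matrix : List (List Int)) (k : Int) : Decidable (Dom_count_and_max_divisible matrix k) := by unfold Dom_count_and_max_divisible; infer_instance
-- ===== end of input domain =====

-- B sorts the flattened matrix descending, then counts divisibles and takes the FIRST divisible element as the maximum, instead of A's fused count+running-max loop.


-- ===== PORT A =====
def count_and_max_divisible (matrix : List (List Int)) (k : Int) : Int × Option Int :=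
  matrix.foldl (fun st row =>
    row.foldl (fun (st : Int × Option Int) num =>
      if PySem.Int.mod num k = 0 then
        (st.1 + 1,
         match st.2 with
         | none => some num
         | some m => if m < num then some num else some m)
      else st) st) (0, none)

-- ===== PORT B =====
def count_and_max_divisible_alt (matrix : List (List Int)) (k : Int) : Int × Option Int :=
  let flat := PySem.List.sorted (matrix.flatMap (fun row => row)) (fun y => y) true
  let count : Int := flat.foldl (fun c num => if PySem.Int.mod num k = 0 then c + 1 else c) 0
  let max_divisible := flat.find? (fun num => decide (PySem.Int.mod num k = 0))
  (count, max_divisible)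

-- ===== PRECONDITION & SPEC =====
-- Pre_ excludes exactly the inputs where Python A raises ZeroDivisionError: k = 0 with at least one matrix element.
def Pre_count_and_max_divisible (matrix : List (List Int)) (k : Int) : Prop :=
  k ≠ 0 ∨ matrix.all (fun r => r.isEmpty)
instance (matrix : List (List Int)) (k : Int) : Decidable (Pre_count_and_max_divisible matrix k) := by unfold Pre_count_and_max_divisible; infer_instance
def pvWitness_count_and_max_divisible : List (List Int) × Int := ([[1, 2], [4, -6]], 2)
def Spec_count_and_max_divisible (matrix : List (List Int)) (k : Int) (out : Int × Option Int) : Prop := out = count_and_max_divisible_alt matrix k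
instance (matrix : List (List Int)) (k : Int) (out : Int × Option Int) : Decidable (Spec_count_and_max_divisible matrix k out) := by unfold Spec_count_and_max_divisible; infer_instance

-- ===== CLAIM (what is proved, stated in full; the proofs are below) =====
def Claim_equal_count_and_max_divisible : Prop := ∀ (matrix : List (List Int)) (k : Int), Dom_count_and_max_divisible matrix k → Pre_count_and_max_divisible matrix k → Spec_count_and_max_divisible matrix k (count_and_max_divisible matrix k)

-- ===== LEMMAS AND PROOFS =====

-- A's step function on the flattened, filtered stream.
def pvStep : (Int × Option Int) → Int → (Int × Option Int) :=
  fun st num =>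
    (st.1 + 1,
     match st.2 with
     | none => some num
     | some m => if m < num then some num else some m)

lemma pvInner (k : Int) (row : List Int) (st : Int × Option Int) :
    row.foldl (fun (st : Int × Option Int) num =>
      if PySem.Int.mod num k = 0 then
        (st.1 + 1,
         match st.2 with
         | none => some num
         | some m => if m < num then some num else some m)
      else st) st =
    (row.filter (fun num => decide (PySem.Int.mod num k = 0))).foldl pvStep st := by
  induction row generalizing st with
  | nil => rfl
  | cons x t ih =>
    by_cases h : PySem.Int.mod x k = 0 <;>
      simp only [List.foldl_cons, List.filter_cons, h, if_pos, decide_true,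
        decide_false, ite_false] <;> exact ih _

lemma pvA_flat_aux (matrix : List (List Int)) (k : Int) (st : Int × Option Int) :
    matrix.foldl (fun st row =>
      row.foldl (fun (st : Int × Option Int) num =>
        if PySem.Int.mod num k = 0 then
          (st.1 + 1,
           match st.2 with
           | none => some num
           | some m => if m < num then some num else some m)
        else st) st) st =
      (matrix.flatMap (fun row => row.filter (fun num => decide (PySem.Int.mod num k = 0)))).foldl pvStep st := by
  induction matrix generalizing st with
  | nil => rfl
  | cons row rest ih =>
    simp only [List.foldl_cons, List.flatMap_cons, List.foldl_append]
    rw [pvInner]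
    exact ih _

lemma pvFold_spec (ds : List Int) (c : Int) (m : Option Int) :
    ds.foldl pvStep (c, m) =
      (c + ds.length, ds.foldl (fun o n => match o with
        | none => some n
        | some a => if a < n then some n else some a) m) := by
  induction ds generalizing c m with
  | nil => simp
  | cons d t ih =>
    simp only [List.foldl_cons, List.length_cons]
    rw [ih]
    simp only [pvStep, Prod.mk.injEq, and_true]
    push_cast
    omega

lemma pvRunMax (t : List Int) (d : Int) :
    t.foldl (fun o n => match o with
      | none => some n
      | some a => if a < n then some n else some a) (some d) = some (t.foldl max d) := by
  induction t generalizing d with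
  | nil => rfl
  | cons x xs ih =>
    simp only [List.foldl_cons]
    rw [show (if d < x then some x else some d) = some (max d x) by
      split <;> simp only [Option.some.injEq] <;> omega]
    exact ih _

-- B's counting fold is the length of the filtered list.
lemma pvCount (p : Int → Bool) (xs : List Int) (c : Int) :
    xs.foldl (fun c num => if p num then c + 1 else c) c = c + (xs.filter p).length := by
  induction xs generalizing c with
  | nil => simp
  | cons x t ih =>
    cases h : p x
    · simp only [List.foldl_cons, List.filter_cons, h]
      exact ih c
    · simp only [List.foldl_cons, List.filter_cons, h, if_true, List.length_cons]
      rw [ih]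
      push_cast
      omega

-- next(x for x in xs if p) is the head of the filtered list.
lemma pvFind_eq_head_filter (p : Int → Bool) (xs : List Int) :
    xs.find? p = (xs.filter p).head? := by
  induction xs with
  | nil => rfl
  | cons x t ih =>
    rw [List.find?_cons, List.filter_cons]
    cases h : p x
    · simp only [if_false, Bool.false_eq_true]
      exact ih
    · simp only [if_true, List.head?_cons]

-- filtering the flattened matrix = flattening the filtered rows
lemma pvFilter_flatMap (p : Int → Bool) (matrix : List (List Int)) :
    (matrix.flatMap (fun row => row)).filter p = matrix.flatMap (fun row => row.filter p) := by
  induction matrix with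
  | nil => rfl
  | cons r t ih => rw [List.flatMap_cons, List.flatMap_cons, List.filter_append, ih]

-- ===== VERDICT (by name: the statement is the Claim_ definition above) =====
theorem count_and_max_divisible_spec : Claim_equal_count_and_max_divisible := by
  intro matrix k _ _
  unfold Spec_count_and_max_divisible count_and_max_divisible_alt count_and_max_divisible
  set p : Int → Bool := fun num => decide (PySem.Int.mod num k = 0) with hp
  rw [pvA_flat_aux matrix k (0, none), pvFold_spec]
  set D := matrix.flatMap (fun row => row.filter p) with hD
  set flat := PySem.List.sorted (matrix.flatMap (fun row => row)) (fun y => y) true with hflat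
  have hperm : (flat.filter p).Perm D := by
    rw [hD, ← pvFilter_flatMap]
    exact (PySem.List.sorted_perm _ _ _).filter p
  have hlen : (flat.filter p).length = D.length := hperm.length_eq
  have hpair : (flat.filter p).Pairwise (fun a b => b ≤ a) :=
    (PySem.List.sorted_pairwise_rev (matrix.flatMap (fun row => row)) (fun y => y)).filter p
  refine Prod.ext ?_ ?_
  · show (0 : Int) + D.length = flat.foldl (fun c num => if PySem.Int.mod num k = 0 then c + 1 else c) 0
    have : (fun (c : Int) num => if PySem.Int.mod num k = 0 then c + 1 else c)
         = (fun (c : Int) num => if p num then c + 1 else c) := by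
      funext c num; simp [hp]
    rw [this, pvCount p flat 0, hlen]
  · show (D.foldl (fun o n => match o with
        | none => some n
        | some a => if a < n then some n else some a) none) = flat.find? p
    rw [pvFind_eq_head_filter]
    cases hFD : flat.filter p with
    | nil =>
      have : D = [] := by
        have := hperm.length_eq; rw [hFD] at this; simpa using (List.length_eq_zero_iff.mp this.symm)
      simp [this]
    | cons f s =>
      have hDne : D ≠ [] := by
        intro h; rw [h] at hperm
        simp [hFD] at hperm
      obtain ⟨d, t, hdt⟩ := List.exists_cons_of_ne_nil hDne
      rw [hdt]
      simp only [List.foldl_cons, List.head?_cons]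
      rw [pvRunMax]
      -- mA := t.foldl max d is the max of D; f is the head of the descending filtered list.
      have hmax : PySem.List.max? D (fun y => y) = some (t.foldl max d) := by
        rw [hdt]; exact PySem.List.max?_id_cons d t
      have hmA_mem : t.foldl max d ∈ D := PySem.List.max?_mem hmax
      have hmA_max : ∀ y ∈ D, y ≤ t.foldl max d := by
        intro y hy; exact PySem.List.max?_isMax hmax y hy
      have hf_mem : f ∈ D := hperm.mem_iff.mp (by rw [hFD]; exact List.mem_cons_self)
      have hmA_in_F : t.foldl max d ∈ flat.filter p := hperm.mem_iff.mpr hmA_mem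
      have hf_ge : t.foldl max d ≤ f := by
        rw [hFD] at hmA_in_F hpair
        rcases List.mem_cons.mp hmA_in_F with h | h
        · omega
        · exact List.rel_of_pairwise_cons hpair h
      have : f = t.foldl max d := le_antisymm (hmA_max f hf_mem) hf_ge
      rw [this]
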